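-- pv_equiv track=rewrite | github.com/protdb/dasmixer | dasmixer/api/reporting/reports/pca_report.py | _assign_colors
-- ===== SOURCE A (Python) =====
-- _COLOR_PALETTE = [
--     "#1f77b4", "#ff7f0e", "#2ca02c", "#d62728", "#9467bd",
--     "#8c564b", "#e377c2", "#7f7f7f", "#bcbd22", "#17becf",
--     "#aec7e8", "#ffbb78", "#98df8a", "#ff9896", "#c5b0d5",
--     "#c49c94", "#f7b6d2", "#c7c7c7", "#dbdb8d", "#9edae5",
-- ]
--
-- def _assign_colors(subsets: list[str], color_map: dict[str, str | None]) -> dict[str, str]: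
--     """Return a color per subset, falling back to palette for those without a DB color."""
--     result: dict[str, str] = {}
--     palette_idx = 0
--     for s in subsets:
--         db_color = color_map.get(s)
--         if db_color:
--             result[s] = db_color
--         else:
--             result[s] = _COLOR_PALETTE[palette_idx % len(_COLOR_PALETTE)]
--             palette_idx += 1
--     return result
-- ===== SOURCE B (Python) =====
-- _COLOR_PALETTE = [
--     "#1f77b4", "#ff7f0e", "#2ca02c", "#d62728", "#9467bd",
--     "#8c564b", "#e377c2", "#7f7f7f", "#bcbd22", "#17becf",
--     "#aec7e8", "#ffbb78", "#98df8a", "#ff9896", "#c5b0d5",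
--     "#c49c94", "#f7b6d2", "#c7c7c7", "#dbdb8d", "#9edae5",
-- ]
--
-- def _assign_colors(subsets: "list[str]", color_map: "dict[str, str | None]") -> "dict[str, str]":
--     """Return a color per subset, falling back to palette for those without a DB color."""
--     # Layered construction: key skeleton, then a fallback layer zipped against a
--     # tiled palette (no counter, no modulo), then the DB-color layer on top.
--     missing = [s for s in subsets if not color_map.get(s)]
--     tiled = _COLOR_PALETTE * (len(missing) // len(_COLOR_PALETTE) + 1)
--     out = dict.fromkeys(subsets, "")
--     out.update(zip(missing, tiled))
--     out.update((s, c) for s in subsets if (c := color_map.get(s)))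
--     return out
-- ===== Notes on version B (the rewrite author's own statement) =====
-- stated objective: alternative
-- what changed: B builds the result by layered dict updates instead of A's single loop with a mutable palette counter: a key skeleton via dict.fromkeys, a fallback layer obtained by zipping the ordered missing-color subsets against a pre-tiled palette list (no counter, no modular indexing), and a DB-color layer written on top.
import Mathlib
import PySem

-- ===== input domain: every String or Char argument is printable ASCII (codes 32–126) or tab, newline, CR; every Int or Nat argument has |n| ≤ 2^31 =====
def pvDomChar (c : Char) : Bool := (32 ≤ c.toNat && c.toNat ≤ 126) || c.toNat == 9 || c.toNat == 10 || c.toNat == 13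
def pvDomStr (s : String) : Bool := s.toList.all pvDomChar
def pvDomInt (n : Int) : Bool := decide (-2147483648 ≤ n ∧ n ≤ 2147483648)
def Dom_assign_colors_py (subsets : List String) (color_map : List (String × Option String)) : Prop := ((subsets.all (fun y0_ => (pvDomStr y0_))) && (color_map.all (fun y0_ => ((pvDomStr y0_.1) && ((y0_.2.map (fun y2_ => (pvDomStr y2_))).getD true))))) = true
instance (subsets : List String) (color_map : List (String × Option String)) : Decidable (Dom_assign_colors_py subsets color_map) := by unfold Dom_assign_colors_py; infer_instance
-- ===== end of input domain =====

-- B builds the result dict by layered updates (key skeleton, zip of the missing subsets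
-- against a tiled palette list, DB-color layer on top) instead of A's single loop with a
-- mutable palette counter (objective: alternative, same cost; no argument is mutated).

-- ===== PORT A =====
-- _COLOR_PALETTE (module constant)
def pvPalette : List String :=
  ["#1f77b4", "#ff7f0e", "#2ca02c", "#d62728", "#9467bd",
   "#8c564b", "#e377c2", "#7f7f7f", "#bcbd22", "#17becf",
   "#aec7e8", "#ffbb78", "#98df8a", "#ff9896", "#c5b0d5",
   "#c49c94", "#f7b6d2", "#c7c7c7", "#dbdb8d", "#9edae5"]

-- `color_map.get(s)` followed by Python truthiness: `some c` iff the stored color is a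
-- non-None, non-empty string (both ports test exactly this on the same assoc-list lookup,
-- first match = Python dict lookup)
def pvDbColor (color_map : List (String × Option String)) (s : String) : Option String :=
  match color_map.lookup s with
  | some (some c) => if c = "" then none else some c
  | _ => none

-- `_COLOR_PALETTE[i % len(_COLOR_PALETTE)]` (exact: pyGetD = Python indexing, the index
-- 0 ≤ i % 20 < 20 is always in range)
def pvPalColor (i : Int) : String :=
  PySem.List.pyGetD pvPalette (PySem.Int.mod i (pvPalette.length : Int)) ""

-- A's loop: result dict plus the mutable palette_idx counter
def pvAFold (color_map : List (String × Option String)) (subsets : List String) :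
    PySem.Dict String String × Int :=
  subsets.foldl
    (fun st s =>
      match pvDbColor color_map s with
      | some c => (st.1.insert s c, st.2)
      | none => (st.1.insert s (pvPalColor st.2), st.2 + 1))
    (PySem.Dict.empty, 0)

def assign_colors_py (subsets : List String) (color_map : List (String × Option String)) :
    List (String × String) :=
  (pvAFold color_map subsets).1.items

-- ===== PORT B =====
-- `_COLOR_PALETTE * (len(missing) // len(_COLOR_PALETTE) + 1)` (list repetition; the two
-- lengths are Nats, so Python's // is Nat division here)
def pvTiled (n : Nat) : List String :=
  (List.replicate (n / pvPalette.length + 1) pvPalette).flatten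

-- `dict.fromkeys(subsets, "")`
def pvFromKeys (subsets : List String) : PySem.Dict String String :=
  subsets.foldl (fun d s => d.insert s "") PySem.Dict.empty

-- `out.update(zip(missing, tiled))`
def pvPalLayer (pairs : List (String × String)) (d : PySem.Dict String String) :
    PySem.Dict String String :=
  pairs.foldl (fun d p => d.insert p.1 p.2) d

-- `out.update((s, c) for s in subsets if (c := color_map.get(s)))` — insert only truthy colors
def pvDbLayer (color_map : List (String × Option String)) (subsets : List String)
    (d : PySem.Dict String String) : PySem.Dict String String :=
  subsets.foldl
    (fun d s =>
      match pvDbColor color_map s with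
      | some c => d.insert s c
      | none => d) d

def assign_colors_py_alt (subsets : List String) (color_map : List (String × Option String)) :
    List (String × String) :=
  let missing := subsets.filter (fun s => (pvDbColor color_map s).isNone)
  let tiled := pvTiled missing.length
  (pvDbLayer color_map subsets (pvPalLayer (missing.zip tiled) (pvFromKeys subsets))).items

-- ===== PRECONDITION & SPEC =====
def Spec_assign_colors_py (subsets : List String) (color_map : List (String × Option String)) (out : List (String × String)) : Prop := out = assign_colors_py_alt subsets color_map
instance (subsets : List String) (color_map : List (String × Option String)) (out : List (String × String)) : Decidable (Spec_assign_colors_py subsets color_map out) := by unfold Spec_assign_colors_py; infer_instance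

-- ===== CLAIM (what is proved, stated in full; the proofs are below) =====
def Claim_equal_assign_colors_py : Prop := ∀ (subsets : List String) (color_map : List (String × Option String)), Dom_assign_colors_py subsets color_map → Spec_assign_colors_py subsets color_map (assign_colors_py subsets color_map)

-- ===== LEMMAS AND PROOFS =====

-- the fallback pairs in index form: zip(missing, tiled) = [(s, palette[i % 20]), …]
def pvZl (m : List String) : List (String × String) :=
  (PySem.List.enumerate m 0).map (fun p => (p.2, pvPalColor p.1))

theorem pvPalColor_nat (j : Nat) :
    pvPalColor (j : Int) = pvPalette.getD (j % pvPalette.length) "" := by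
  unfold pvPalColor
  rw [PySem.Int.mod_natCast, PySem.List.pyGetD_natCast]

theorem pvRepFlat_get (m i : Nat) (h : i < m * pvPalette.length) :
    ((List.replicate m pvPalette).flatten)[i]? = pvPalette[i % pvPalette.length]? := by
  induction m generalizing i with
  | zero => simp at h
  | succ m ih =>
    rw [List.replicate_succ, List.flatten_cons]
    by_cases hi : i < pvPalette.length
    · rw [List.getElem?_append_left hi, Nat.mod_eq_of_lt hi]
    · have hlen : pvPalette.length ≤ i := le_of_not_gt hi
      rw [List.getElem?_append_right hlen, ih _ (by
        have h20 : pvPalette.length = 20 := rfl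
        rw [h20] at h hlen ⊢
        omega), Nat.mod_eq_sub_mod hlen]

theorem pvTiled_get (n i : Nat) (h : i ≤ n) :
    (pvTiled n)[i]? = some (pvPalColor (i : Int)) := by
  have hlen : pvPalette.length = 20 := rfl
  have hmod : i % pvPalette.length < pvPalette.length := Nat.mod_lt _ (by rw [hlen]; omega)
  rw [pvTiled, pvRepFlat_get _ _ (by
    have h1 := Nat.div_add_mod n 20
    have h2 : n % 20 < 20 := Nat.mod_lt _ (by omega)
    rw [hlen]; omega), pvPalColor_nat, List.getElem?_eq_getElem hmod, List.getD,
    List.getElem?_eq_getElem hmod]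
  rfl
theorem pvZipEnum (xs : List String) (s : Nat) (ys : List String)
    (h : ∀ i, i < xs.length → ys[i]? = some (pvPalColor ((s + i : Nat) : Int))) :
    xs.zip ys = (PySem.List.enumerate xs (s : Int)).map (fun p => (p.2, pvPalColor p.1)) := by
  induction xs generalizing s ys with
  | nil => simp [PySem.List.enumerate_nil]
  | cons x xs ih =>
    cases ys with
    | nil => have := h 0 (by simp); simp at this
    | cons y ys' =>
      have h0 := h 0 (by simp)
      simp only [List.getElem?_cons_zero, Nat.add_zero, Option.some.injEq] at h0
      rw [List.zip_cons_cons, PySem.List.enumerate_cons, List.map_cons]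
      have hrest : ∀ i, i < xs.length → ys'[i]? = some (pvPalColor ((s + 1 + i : Nat) : Int)) := by
        intro i hi
        have := h (i + 1) (by simpa using Nat.succ_lt_succ hi)
        simpa [Nat.add_assoc, Nat.add_comm 1 i, Nat.add_left_comm] using this
      rw [ih (s + 1) ys' hrest, h0]
      push_cast
      ring_nf
theorem pvZip_eq_zl (m : List String) : m.zip (pvTiled m.length) = pvZl m := by
  have := pvZipEnum m 0 (pvTiled m.length) (fun i hi => by
    rw [pvTiled_get m.length i (Nat.le_of_lt hi)]; norm_num)
  simpa [pvZl] using this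
theorem pvFromKeys_getD (xs : List String) (k : String) (v0 : String) :
    (pvFromKeys xs).getD k v0 = if k ∈ xs then "" else v0 := by
  induction xs using List.reverseRecOn with
  | nil => simp [pvFromKeys, PySem.Dict.getD_empty]
  | append_singleton xs x ih =>
    rw [pvFromKeys, List.foldl_append, List.foldl_cons, List.foldl_nil, ← pvFromKeys,
      PySem.Dict.getD_insert]
    by_cases hk : k = x
    · simp [hk]
    · simp [hk, ih]

theorem pvPalLayer_getD (L : List (String × String)) (d : PySem.Dict String String)
    (k : String) (v0 : String) :
    (pvPalLayer L d).getD k v0 =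
      match L.reverse.find? (fun p => p.1 == k) with
      | some p => p.2
      | none => d.getD k v0 := by
  induction L using List.reverseRecOn with
  | nil => simp [pvPalLayer]
  | append_singleton L p ih =>
    rw [pvPalLayer, List.foldl_append, List.foldl_cons, List.foldl_nil, ← pvPalLayer,
      PySem.Dict.getD_insert, List.reverse_append]
    simp only [List.reverse_cons, List.reverse_nil, List.nil_append, List.cons_append,
      List.find?_cons]
    by_cases hk : k = p.1
    · simp [hk]
    · have : (p.1 == k) = false := by simp [Ne.symm hk]
      simp [hk, this, ih]

theorem pvDbLayer_getD (color_map : List (String × Option String)) (xs : List String)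
    (d : PySem.Dict String String) (k : String) (v0 : String) :
    (pvDbLayer color_map xs d).getD k v0 =
      match pvDbColor color_map k with
      | some c => if k ∈ xs then c else d.getD k v0
      | none => d.getD k v0 := by
  induction xs generalizing d with
  | nil =>
    show d.getD k v0 = _
    cases pvDbColor color_map k
    · rfl
    · simp
  | cons s xs ih =>
    rw [pvDbLayer, List.foldl_cons]
    cases hdb : pvDbColor color_map s with
    | none =>
      rw [← pvDbLayer, ih]
      by_cases hk : k = s
      · subst hk
        simp [hdb]
      · cases pvDbColor color_map k <;> simp [hk]
    | some c =>
      rw [← pvDbLayer, ih]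
      by_cases hk : k = s
      · subst hk
        rw [hdb]
        simp
      · cases pvDbColor color_map k <;>
          simp [hk, PySem.Dict.getD_insert]
theorem pvFromKeys_keys (xs : List String) :
    (pvFromKeys xs).keys = PySem.List.dedup xs := by
  rw [pvFromKeys, PySem.Dict.keys_foldl_insert (f := fun _ _ => ""),
    PySem.Dict.keys_empty, PySem.Set.update_nil_left, PySem.List.dedup_eq_ofList]

theorem pvPalLayer_keys (L : List (String × String)) (d : PySem.Dict String String)
    (h : ∀ p ∈ L, p.1 ∈ d.keys) : (pvPalLayer L d).keys = d.keys := by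
  rw [pvPalLayer, PySem.Dict.keys_foldl_insert_key (key := Prod.fst) (f := fun _ p => p.2),
    PySem.Set.update_eq_append_filter]
  have : (PySem.Set.ofList (L.map Prod.fst)).filter
      (fun y => !(PySem.Set.contains d.keys y)) = [] := by
    rw [List.filter_eq_nil_iff]
    intro y hy
    have hy' : y ∈ L.map Prod.fst := (PySem.Set.mem_ofList _ _).mp hy
    obtain ⟨p, hp, rfl⟩ := List.mem_map.mp hy'
    simpa using h p hp
  rw [this, List.append_nil]

theorem pvDbLayer_keys (color_map : List (String × Option String)) (xs : List String)
    (d : PySem.Dict String String) (h : ∀ s ∈ xs, s ∈ d.keys) :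
    (pvDbLayer color_map xs d).keys = d.keys := by
  induction xs generalizing d with
  | nil => rfl
  | cons s xs ih =>
    rw [pvDbLayer, List.foldl_cons]
    cases hdb : pvDbColor color_map s with
    | none =>
      rw [← pvDbLayer, ih _ (fun t ht => h t (List.mem_cons_of_mem _ ht))]
    | some c =>
      rw [← pvDbLayer]
      have hkeys : (d.insert s c).keys = d.keys :=
        PySem.Dict.keys_insert_of_contains _ _
          ((PySem.Dict.contains_iff_mem_keys _ _).mpr (h s List.mem_cons_self))
      rw [ih _ (fun t ht => hkeys ▸ h t (List.mem_cons_of_mem _ ht)), hkeys]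
def pvVal (color_map : List (String × Option String)) (xs : List String)
    (k : String) (v0 : String) : String :=
  match pvDbColor color_map k with
  | some c => if k ∈ xs then c else v0
  | none =>
    match ((pvZl (xs.filter (fun s => (pvDbColor color_map s).isNone))).reverse.find?
        (fun p => p.1 == k)) with
    | some p => p.2
    | none => v0

theorem pvAMain (color_map : List (String × Option String)) (xs : List String) :
    (pvAFold color_map xs).2 =
        ((xs.filter (fun s => (pvDbColor color_map s).isNone)).length : Int)
    ∧ (pvAFold color_map xs).1.keys = PySem.List.dedup xs
    ∧ ∀ k v0, (pvAFold color_map xs).1.getD k v0 = pvVal color_map xs k v0 := by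
  induction xs using List.reverseRecOn with
  | nil =>
    refine ⟨rfl, rfl, fun k v0 => ?_⟩
    cases hdb : pvDbColor color_map k <;>
      simp [pvAFold, pvVal, hdb, pvZl, PySem.List.enumerate_nil, PySem.Dict.getD_empty]
  | append_singleton xs x ih =>
    obtain ⟨ih1, ih2, ih3⟩ := ih
    have hstep : pvAFold color_map (xs ++ [x]) =
        (match pvDbColor color_map x with
         | some c => ((pvAFold color_map xs).1.insert x c, (pvAFold color_map xs).2)
         | none => ((pvAFold color_map xs).1.insert x (pvPalColor (pvAFold color_map xs).2),
                    (pvAFold color_map xs).2 + 1)) := by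
      rw [pvAFold, List.foldl_append, List.foldl_cons, List.foldl_nil, ← pvAFold]
    have hkeys : ∀ v : String, ((pvAFold color_map xs).1.insert x v).keys =
        PySem.List.dedup (xs ++ [x]) := by
      intro v
      rw [PySem.List.dedup_eq_ofList, PySem.Set.ofList_append_singleton,
        PySem.Set.add_eq_ite, ← PySem.List.dedup_eq_ofList]
      by_cases hx : x ∈ xs
      · rw [if_pos ((PySem.List.mem_dedup _ _).mpr hx),
          PySem.Dict.keys_insert_of_contains _ _
            ((PySem.Dict.contains_iff_mem_keys _ _).mpr
              (ih2 ▸ (PySem.List.mem_dedup _ _).mpr hx)),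
          ih2]
      · rw [if_neg (fun hc => hx ((PySem.List.mem_dedup _ _).mp hc)),
          PySem.Dict.keys_insert_of_not_contains _ _ ?_, ih2]
        rw [Bool.eq_false_iff]
        intro hc
        exact hx ((PySem.List.mem_dedup _ _).mp (ih2 ▸ (PySem.Dict.contains_iff_mem_keys _ _).mp hc))
    cases hdb : pvDbColor color_map x with
    | some c =>
      rw [hstep]
      simp only [hdb]
      have hfilt : (xs ++ [x]).filter (fun s => (pvDbColor color_map s).isNone) =
          xs.filter (fun s => (pvDbColor color_map s).isNone) := by
        simp [List.filter_append, hdb]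
      refine ⟨by rw [ih1, hfilt], hkeys c, fun k v0 => ?_⟩
      rw [PySem.Dict.getD_insert]
      by_cases hk : k = x
      · subst hk
        simp [pvVal, hdb]
      · rw [if_neg hk, ih3, pvVal, pvVal, hfilt]
        cases pvDbColor color_map k <;> simp [hk]
    | none =>
      rw [hstep]
      simp only [hdb]
      have hfilt : (xs ++ [x]).filter (fun s => (pvDbColor color_map s).isNone) =
          xs.filter (fun s => (pvDbColor color_map s).isNone) ++ [x] := by
        simp [List.filter_append, hdb]
      set M := xs.filter (fun s => (pvDbColor color_map s).isNone) with hM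
      have hzl : pvZl (M ++ [x]) = pvZl M ++ [(x, pvPalColor (M.length : Int))] := by
        rw [pvZl, PySem.List.enumerate_append, List.map_append, ← pvZl,
          PySem.List.enumerate_cons, PySem.List.enumerate_nil]
        simp
      refine ⟨by rw [ih1, hfilt]; simp, hkeys _, fun k v0 => ?_⟩
      rw [PySem.Dict.getD_insert]
      by_cases hk : k = x
      · subst hk
        rw [if_pos rfl, pvVal, hdb, hfilt, hzl, List.reverse_append]
        simp [ih1]
      · rw [if_neg hk, ih3, pvVal, pvVal, hfilt, hzl, List.reverse_append]
        cases pvDbColor color_map k with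
        | some c' => simp [hk]
        | none =>
          simp only [List.reverse_cons, List.reverse_nil, List.nil_append, List.cons_append,
            List.find?_cons]
          have : (x == k) = false := by simp [Ne.symm hk]
          rw [this]
theorem pvPortsEq (subsets : List String) (cm : List (String × Option String)) :
    assign_colors_py subsets cm = assign_colors_py_alt subsets cm := by
  obtain ⟨h1, h2, h3⟩ := pvAMain cm subsets
  set M := subsets.filter (fun s => (pvDbColor cm s).isNone) with hM
  have halt : assign_colors_py_alt subsets cm =
      (pvDbLayer cm subsets (pvPalLayer (pvZl M) (pvFromKeys subsets))).items := by
    simp only [assign_colors_py_alt]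
    rw [← hM, pvZip_eq_zl]
  rw [assign_colors_py, halt]
  have hkfrom := pvFromKeys_keys subsets
  have hkpal : (pvPalLayer (pvZl M) (pvFromKeys subsets)).keys = PySem.List.dedup subsets := by
    rw [pvPalLayer_keys _ _ ?_, hkfrom]
    intro p hp
    rw [hkfrom]
    apply (PySem.List.mem_dedup _ _).mpr
    apply List.mem_of_mem_filter (p := fun s => (pvDbColor cm s).isNone)
    show p.1 ∈ M
    rcases List.mem_map.mp hp with ⟨q, hq, rfl⟩
    rcases (PySem.List.mem_enumerate_iff _ _ _).mp hq with ⟨j, hj, rfl⟩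
    exact List.getElem_mem hj
  have hkB : (pvDbLayer cm subsets (pvPalLayer (pvZl M) (pvFromKeys subsets))).keys =
      PySem.List.dedup subsets := by
    rw [pvDbLayer_keys _ _ _ ?_, hkpal]
    intro s hs
    rw [hkpal]
    exact (PySem.List.mem_dedup _ _).mpr hs
  rw [PySem.Dict.items_eq_map_keys _ (h2 ▸ PySem.List.nodup_dedup subsets) "",
    PySem.Dict.items_eq_map_keys _ (hkB ▸ PySem.List.nodup_dedup subsets) "",
    h2, hkB]
  apply List.map_congr_left
  intro k hk
  have hks : k ∈ subsets := (PySem.List.mem_dedup _ _).mp hk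
  have hBval : (pvDbLayer cm subsets (pvPalLayer (pvZl M) (pvFromKeys subsets))).getD k "" =
      pvVal cm subsets k "" := by
    rw [pvDbLayer_getD, pvPalLayer_getD, pvFromKeys_getD, pvVal]
    cases hdb : pvDbColor cm k with
    | some c => simp [hks]
    | none =>
      rw [← hM]
      cases (pvZl M).reverse.find? (fun p => p.1 == k) <;> simp [hks]
  rw [h3 k "", hBval]

-- ===== VERDICT (by name: the statement is the Claim_ definition above) =====
theorem assign_colors_py_spec : Claim_equal_assign_colors_py := by
  intro subsets color_map _
  unfold Spec_assign_colors_py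
  exact pvPortsEq subsets color_map
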